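-- pv_equiv track=rewrite | github.com/w200024212/pebbleos | tools/generate_native_sdk/generate_app_header.py | strip_internal_subcomments
-- ===== SOURCE A (Python) =====
-- def strip_internal_subcomments(string):
--     """ Takes a multiline comment string and strips out the parts of the comment after an @internal keyword"""
--     result = []
--     in_internal_comment = False
--     for line in string.splitlines():
--         if '@internal' in line and line.lstrip().startswith("//!"):
--             in_internal_comment = True
--         elif in_internal_comment:
--             if not line.lstrip().startswith("//!"):
--                 in_internal_comment = False
--                 result.append(line)
--         else:
--             result.append(line)
--     return '\n'.join(result)
-- ===== SOURCE B (Python) =====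
-- def strip_internal_subcomments(string):
--     """ Takes a multiline comment string and strips out the parts of the comment after an @internal keyword"""
--     lines = string.splitlines()
--     out = []
--     i = 0
--     n = len(lines)
--     while i < n:
--         line = lines[i]
--         if '@internal' in line and line.lstrip().startswith('//!'):
--             i += 1
--             while i < n and lines[i].lstrip().startswith('//!'):
--                 i += 1
--         else:
--             out.append(line)
--             i += 1
--     return '\n'.join(out)
-- ===== Notes on version B (the rewrite author's own statement) =====
-- stated objective: alternative
-- what changed: Replaces A's flag-based single-pass state machine (in_internal_comment boolean threaded through every line) with an index-based outer while loop that, on seeing an '//! ... @internal' line, runs an inner while consuming the whole '//!' block and then lets the outer loop re-examine the stopping line; no boolean state survives across iterations.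
import Mathlib
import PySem

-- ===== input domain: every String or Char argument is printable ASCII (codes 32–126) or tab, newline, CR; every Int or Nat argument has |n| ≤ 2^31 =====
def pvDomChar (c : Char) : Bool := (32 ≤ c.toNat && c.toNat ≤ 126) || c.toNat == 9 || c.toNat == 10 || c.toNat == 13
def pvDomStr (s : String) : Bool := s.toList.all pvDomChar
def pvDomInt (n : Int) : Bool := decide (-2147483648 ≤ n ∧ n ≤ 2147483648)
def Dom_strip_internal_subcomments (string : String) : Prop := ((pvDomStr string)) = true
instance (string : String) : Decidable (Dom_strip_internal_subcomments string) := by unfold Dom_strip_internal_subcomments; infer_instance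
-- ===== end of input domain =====

-- B replaces A's flag-based state machine with an index-free nested-loop decomposition
-- (consume the @internal block eagerly, re-examine the stopping line); objective: alternative.


-- ===== PORT A =====
-- one iteration of A's for-loop; state = (result, in_internal_comment)
def stripA_step (st : List String × Bool) (line : String) : List String × Bool :=
  if PySem.Str.isIn "@internal" line && PySem.Str.startswith (PySem.Str.lstrip line) "//!" then
    (st.1, true)
  else if st.2 then
    (if !(PySem.Str.startswith (PySem.Str.lstrip line) "//!") then (st.1 ++ [line], false) else st)
  else
    (st.1 ++ [line], st.2)

def strip_internal_subcomments (string : String) : String :=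
  PySem.Str.join "\n" ((PySem.Str.splitlines string).foldl stripA_step ([], false)).1

-- ===== PORT B =====
def stripB_isBang (line : String) : Bool :=
  PySem.Str.startswith (PySem.Str.lstrip line) "//!"

def stripB_starts (line : String) : Bool :=
  PySem.Str.isIn "@internal" line && stripB_isBang line

-- inner while loop: skip the following '//!' lines
def stripB_consume : List String → List String
  | [] => []
  | l :: rest => if stripB_isBang l then stripB_consume rest else l :: rest

theorem stripB_consume_length_le (ls : List String) : (stripB_consume ls).length ≤ ls.length := by
  induction ls with
  | nil => simp [stripB_consume]
  | cons l rest ih =>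
    simp only [stripB_consume]
    split
    · exact Nat.le_succ_of_le ih
    · simp

-- outer while loop over the lines
def stripB_loop : List String → List String
  | [] => []
  | l :: rest =>
    if stripB_starts l then stripB_loop (stripB_consume rest)
    else l :: stripB_loop rest
termination_by ls => ls.length
decreasing_by
  · exact Nat.lt_succ_of_le (stripB_consume_length_le rest)
  · simp

def strip_internal_subcomments_alt (string : String) : String :=
  PySem.Str.join "\n" (stripB_loop (PySem.Str.splitlines string))

-- ===== PRECONDITION & SPEC =====
def Spec_strip_internal_subcomments (string : String) (out : String) : Prop := out = strip_internal_subcomments_alt string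
instance (string : String) (out : String) : Decidable (Spec_strip_internal_subcomments string out) := by unfold Spec_strip_internal_subcomments; infer_instance

-- ===== CLAIM (what is proved, stated in full; the proofs are below) =====
def Claim_equal_strip_internal_subcomments : Prop := ∀ (string : String), Dom_strip_internal_subcomments string → Spec_strip_internal_subcomments string (strip_internal_subcomments string)

-- ===== LEMMAS AND PROOFS =====

-- A's loop in the in_internal_comment=true state emits exactly what it emits after B's inner loop consumed the '//!' lines
theorem stripA_true_eq_consume (ls : List String) (res : List String) :
    (ls.foldl stripA_step (res, true)).1 = ((stripB_consume ls).foldl stripA_step (res, false)).1 := by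
  induction ls generalizing res with
  | nil => simp [stripB_consume]
  | cons l rest ih =>
    by_cases hb : PySem.Str.startswith (PySem.Str.lstrip l) "//!" = true
    · have hstep : stripA_step (res, true) l = (res, true) := by
        by_cases hi : PySem.Str.isIn "@internal" l = true <;>
          · simp only [stripA_step]
            simp at hb hi ⊢
            simp [hb, hi]
      simp only [List.foldl_cons, hstep, stripB_consume]
      simp only [stripB_isBang, hb, if_true]
      exact ih res
    · have hstep : stripA_step (res, true) l = (res ++ [l], false) := by
        simp only [stripA_step]
        simp at hb ⊢
        simp [hb]
      have hstep' : stripA_step (res, false) l = (res ++ [l], false) := by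
        simp only [stripA_step]
        simp at hb ⊢
        simp [hb]
      have hc : stripB_consume (l :: rest) = l :: rest := by
        simp only [stripB_consume, stripB_isBang]
        rw [if_neg hb]
      rw [hc, List.foldl_cons, List.foldl_cons, hstep, hstep']

-- A's loop from the false state produces exactly B's outer loop output
theorem stripA_false_eq_loop :
    ∀ (n : Nat) (ls : List String), ls.length ≤ n → ∀ (res : List String),
      (ls.foldl stripA_step (res, false)).1 = res ++ stripB_loop ls := by
  intro n
  induction n with
  | zero =>
    intro ls hls res
    have : ls = [] := List.eq_nil_of_length_eq_zero (Nat.le_zero.mp hls)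
    simp [this, stripB_loop]
  | succ n ih =>
    intro ls hls res
    cases ls with
    | nil => simp [stripB_loop]
    | cons l rest =>
      simp only [List.length_cons, Nat.succ_le_succ_iff] at hls
      by_cases hs : stripB_starts l
      · have hstep : stripA_step (res, false) l = (res, true) := by
          simp only [stripA_step]
          simp only [stripB_starts, stripB_isBang] at hs
          simp at hs ⊢
          simp [hs.1, hs.2]
        rw [List.foldl_cons, hstep, stripA_true_eq_consume]
        rw [ih (stripB_consume rest) (le_trans (stripB_consume_length_le rest) hls) res]
        rw [stripB_loop, if_pos hs]
      · have hstep : stripA_step (res, false) l = (res ++ [l], false) := by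
          simp only [stripA_step]
          simp only [stripB_starts, stripB_isBang] at hs
          simp at hs ⊢
          exact hs
        rw [List.foldl_cons, hstep, ih rest hls (res ++ [l])]
        rw [stripB_loop, if_neg hs]
        simp

-- ===== VERDICT (by name: the statement is the Claim_ definition above) =====
theorem strip_internal_subcomments_spec : Claim_equal_strip_internal_subcomments := by
  intro s _
  unfold Spec_strip_internal_subcomments strip_internal_subcomments strip_internal_subcomments_alt
  rw [stripA_false_eq_loop (PySem.Str.splitlines s).length _ (le_refl _) []]
  simp
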